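-- pv_equiv track=rewrite | github.com/KristianFenn/AoC2020 | day14.py | apply_simple_mask
-- ===== SOURCE A (Python) =====
-- bit_len = 36
--
-- def to_bit_array(num):
--     bit_string = bin(num)[2:]
--     bin_string_len = len(bit_string)
--
--     if bin_string_len < bit_len:
--         bit_string = ("0" * (bit_len - bin_string_len)) + bit_string
--     elif bin_string_len > bit_len:
--         bit_string = bit_string[-bit_len:]
--
--     return [x for x in bit_string]
--
-- def from_bit_array(bit_array):
--     as_string = "".join(bit_array)
--     return int(as_string, 2)
--
-- def apply_simple_mask(num, mask):
--     num_bit_array = to_bit_array(num)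
--     for idx,bit in enumerate(mask):
--         if bit == "0":
--             num_bit_array[idx] = "0"
--         elif bit == "1":
--             num_bit_array[idx] = "1"
--     return from_bit_array(num_bit_array)
-- ===== SOURCE B (Python) =====
-- def apply_simple_mask(num, mask):
--     # Build two integer masks in one pass over the (at most 36) mask chars,
--     # then combine with plain bitwise arithmetic: no char array, no string parse.
--     ones = 0                 # bits forced to 1 by the mask
--     keep = (1 << 36) - 1     # bits of num that pass through
--     for idx, bit in enumerate(mask[:36]):
--         if bit == '1':
--             ones |= 1 << (35 - idx)
--         elif bit == '0':
--             keep ^= 1 << (35 - idx)   # each idx occurs once and keep's bit is still set, so this clears it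
--     return (num & keep) | ones
-- ===== Notes on version B (the rewrite author's own statement) =====
-- stated objective: idiomatic
-- what changed: Instead of converting num to a 36-char bit array, mutating it per mask position and re-parsing the string with int(.,2), B folds the mask into two integer bitmasks (forced-one bits and pass-through bits) and returns (num & keep) | ones by pure bitwise arithmetic.
-- outside the precondition, e.g. on apply_simple_mask(-2, 'XXXXXXXXXXXXXXXXXXXXXXXXXXXXXXXXX000'): A returns 0, B returns 68719476728
import Mathlib
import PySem

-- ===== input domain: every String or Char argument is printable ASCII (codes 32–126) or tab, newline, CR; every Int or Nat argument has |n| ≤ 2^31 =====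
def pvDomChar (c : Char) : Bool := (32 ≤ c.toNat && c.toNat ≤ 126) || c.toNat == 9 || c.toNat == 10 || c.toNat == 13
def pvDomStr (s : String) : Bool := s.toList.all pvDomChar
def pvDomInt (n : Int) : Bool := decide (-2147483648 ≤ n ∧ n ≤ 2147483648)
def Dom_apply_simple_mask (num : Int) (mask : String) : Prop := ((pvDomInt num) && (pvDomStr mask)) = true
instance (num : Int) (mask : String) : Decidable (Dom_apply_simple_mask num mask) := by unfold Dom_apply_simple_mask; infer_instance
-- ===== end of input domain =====

-- B replaces A's bit-array round trip (bin, pad, per-char mutation, int(.,2)) by two integer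
-- bitmasks folded over the mask and one bitwise combine (objective: idiomatic).

-- ===== PORT A =====
-- bin(n) ported by hand: natBinAux prepends the binary digits of n (most significant first);
-- exact for every int (bin(0) = "0b0", negatives get a '-' prefix).
def natBinAux : Nat → List Char → List Char
  | 0, acc => acc
  | n+1, acc => natBinAux ((n+1)/2) ((if (n+1) % 2 = 1 then '1' else '0') :: acc)
decreasing_by exact Nat.div_lt_self (Nat.succ_pos n) (by omega)

def pyBinChars (n : Int) : List Char :=
  if n < 0 then '-' :: '0' :: 'b' :: natBinAux n.natAbs []
  else if n = 0 then '0' :: 'b' :: ['0']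
  else '0' :: 'b' :: natBinAux n.toNat []

-- to_bit_array; [x for x in bit_string] is the char list itself
def to_bit_array (num : Int) : List Char :=
  let bit_string := PySem.List.slice (pyBinChars num) (some 2) none
  if bit_string.length < 36 then List.replicate (36 - bit_string.length) '0' ++ bit_string
  else if bit_string.length > 36 then PySem.List.slice bit_string (some (-(36:Int))) none
  else bit_string

-- int(s, 2) ported by hand as the digit fold; exact on strings of '0'/'1' digits — the only
-- strings from_bit_array receives under Pre_ (Python raises ValueError otherwise).
def parse2 (l : List Char) : Nat := l.foldl (fun a c => 2 * a + (if c = '1' then 1 else 0)) 0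

def from_bit_array (bit_array : List Char) : Int := (parse2 bit_array : Int)

-- num_bit_array[idx] = c raises IndexError for idx ≥ 36 in Python; List.set is a no-op there
-- (those inputs are outside Pre_).
def apply_simple_mask (num : Int) (mask : String) : Int :=
  let num_bit_array := to_bit_array num
  let arr := (PySem.List.enumerate mask.toList 0).foldl
    (fun a (p : Int × Char) =>
      if p.2 = '0' then a.set p.1.toNat '0'
      else if p.2 = '1' then a.set p.1.toNat '1'
      else a) num_bit_array
  from_bit_array arr

-- ===== PORT B =====
-- idx ≤ 35 inside mask[:36], so Python's 1 << (35 - idx) is (1 : Int) <<< (35 - idx).toNat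
def apply_simple_mask_alt (num : Int) (mask : String) : Int :=
  let s := (PySem.List.enumerate (PySem.List.slice mask.toList none (some 36)) 0).foldl
    (fun (s : Int × Int) (p : Int × Char) =>
      if p.2 = '1' then (PySem.Int.bor s.1 ((1:Int) <<< (35 - p.1).toNat), s.2)
      else if p.2 = '0' then (s.1, PySem.Int.bxor s.2 ((1:Int) <<< (35 - p.1).toNat))
      else s)
    ((0 : Int), ((1:Int) <<< 36) - 1)
  PySem.Int.bor (PySem.Int.band num s.2) s.1

-- ===== PRECONDITION & SPEC =====
-- Pre_ excludes negative num, where A's bin() mangling ('b' lands in the bit array) makes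
-- int(.,2) raise ValueError except when the mask happens to overwrite every mangled char
-- (an accidental value there — see the cite), and masks with a '0'/'1' at an index ≥ 36,
-- where A raises IndexError.
def Pre_apply_simple_mask (num : Int) (mask : String) : Prop :=
  0 ≤ num ∧ (mask.toList.drop 36).all (fun c => !(c == '0' || c == '1')) = true
instance (num : Int) (mask : String) : Decidable (Pre_apply_simple_mask num mask) := by
  unfold Pre_apply_simple_mask; infer_instance

def pvWitness_apply_simple_mask : Int × String := (11, "1X0")

def Spec_apply_simple_mask (num : Int) (mask : String) (out : Int) : Prop := out = apply_simple_mask_alt num mask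
instance (num : Int) (mask : String) (out : Int) : Decidable (Spec_apply_simple_mask num mask out) := by unfold Spec_apply_simple_mask; infer_instance

-- ===== CLAIM (what is proved, stated in full; the proofs are below) =====
def Claim_equal_apply_simple_mask : Prop := ∀ (num : Int) (mask : String), Dom_apply_simple_mask num mask → Pre_apply_simple_mask num mask → Spec_apply_simple_mask num mask (apply_simple_mask num mask)


-- ===== LEMMAS AND PROOFS =====

-- parse2 as a fold from a general accumulator
lemma parse2_foldl (l : List Char) : ∀ a : Nat,
    l.foldl (fun a c => 2 * a + (if c = '1' then 1 else 0)) a = a * 2 ^ l.length + parse2 l := by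
  induction l with
  | nil => intro a; simp [parse2]
  | cons c t ih =>
    intro a
    have h1 : parse2 (c :: t) = t.foldl (fun a c => 2 * a + (if c = '1' then 1 else 0))
        (if c = '1' then 1 else 0) := by
      simp [parse2]
    simp only [List.foldl_cons, List.length_cons]
    rw [ih, h1, ih]
    ring

lemma parse2_cons (c : Char) (t : List Char) :
    parse2 (c :: t) = (if c = '1' then 1 else 0) * 2 ^ t.length + parse2 t := by
  have h1 : parse2 (c :: t) = t.foldl (fun a c => 2 * a + (if c = '1' then 1 else 0))
      (if c = '1' then 1 else 0) := by simp [parse2]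
  rw [h1, parse2_foldl]

lemma parse2_append (xs ys : List Char) :
    parse2 (xs ++ ys) = parse2 xs * 2 ^ ys.length + parse2 ys := by
  have : parse2 (xs ++ ys) = ys.foldl (fun a c => 2 * a + (if c = '1' then 1 else 0)) (parse2 xs) := by
    simp [parse2, List.foldl_append]
  rw [this, parse2_foldl]

lemma parse2_replicate_zero (k : Nat) : parse2 (List.replicate k '0') = 0 := by
  induction k with
  | zero => simp [parse2]
  | succ k ih => rw [List.replicate_succ, parse2_cons]; simp [ih]

lemma natBinAux_parse2 : ∀ n acc, parse2 (natBinAux n acc) = n * 2 ^ acc.length + parse2 acc := by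
  intro n
  induction n using Nat.strong_induction_on with
  | _ n ih =>
    intro acc
    match n with
    | 0 => simp [natBinAux]
    | m + 1 =>
      rw [natBinAux]
      rw [ih ((m+1)/2) (Nat.div_lt_self (Nat.succ_pos m) one_lt_two)]
      rw [parse2_cons]
      simp only [List.length_cons, pow_succ]
      by_cases h : (m+1) % 2 = 1
      · simp only [h, if_true]
        have hm : m + 1 = 2 * ((m+1)/2) + 1 := by omega
        set q := (m+1)/2 with hq
        rw [hm]; ring
      · simp only [h, if_false]
        have hc : (if ('0':Char) = '1' then (1:Nat) else 0) = 0 := by decide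
        rw [hc]
        have hm : m + 1 = 2 * ((m+1)/2) := by omega
        set q := (m+1)/2 with hq
        rw [hm]; ring

lemma natBinAux_length : ∀ k n acc, n < 2 ^ k → (natBinAux n acc).length ≤ k + acc.length := by
  intro k
  induction k with
  | zero =>
    intro n acc h
    have : n = 0 := by simpa using h
    subst this; simp [natBinAux]
  | succ k ih =>
    intro n acc h
    match n with
    | 0 => simp [natBinAux]
    | m + 1 =>
      rw [natBinAux]
      have h2 : (2:Nat) ^ (k+1) = 2 ^ k * 2 := pow_succ 2 k
      have hlt : (m+1)/2 < 2 ^ k := by omega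
      have := ih ((m+1)/2) ((if (m+1) % 2 = 1 then '1' else '0') :: acc) hlt
      simp only [List.length_cons] at this
      omega

lemma natBinAux_binary : ∀ n acc, (∀ c ∈ acc, c = '0' ∨ c = '1') →
    ∀ c ∈ natBinAux n acc, c = '0' ∨ c = '1' := by
  intro n
  induction n using Nat.strong_induction_on with
  | _ n ih =>
    intro acc hacc
    match n with
    | 0 => simpa [natBinAux] using hacc
    | m + 1 =>
      rw [natBinAux]
      refine ih ((m+1)/2) (Nat.div_lt_self (Nat.succ_pos m) one_lt_two) _ ?_
      intro c hc
      rcases List.mem_cons.mp hc with h | h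
      · subst h; split <;> simp
      · exact hacc c h

-- bit j of parse2 l (most significant digit first)
def bitAt (l : List Char) (j : Nat) : Bool :=
  decide (j < l.length) && (l.getD (l.length - 1 - j) 'X' == '1')

lemma testBit_parse2 (l : List Char) (hb : ∀ c ∈ l, c = '0' ∨ c = '1') :
    ∀ j, (parse2 l).testBit j = bitAt l j := by
  induction l using List.reverseRecOn with
  | nil => intro j; simp [parse2, bitAt]
  | append_singleton t c ih =>
    intro j
    have hbt : ∀ c ∈ t, c = '0' ∨ c = '1' := fun x hx => hb x (List.mem_append_left _ hx)
    have hbc : c = '0' ∨ c = '1' := hb c (List.mem_append_right _ (List.mem_singleton.mpr rfl))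
    have hp : parse2 (t ++ [c]) = 2 * parse2 t + (if c = '1' then 1 else 0) := by
      rw [parse2_append]
      have : parse2 [c] = (if c = '1' then 1 else 0) := by
        rw [show ([c] : List Char) = c :: [] from rfl, parse2_cons]; simp [parse2]
      rw [this]; simp [Nat.mul_comm]
    cases j with
    | zero =>
      rw [hp]
      have hlhs : (2 * parse2 t + (if c = '1' then 1 else 0)).testBit 0
          = (c == '1') := by
        rcases hbc with h | h <;> subst h <;> simp [Nat.testBit_zero] <;> omega
      rw [hlhs]
      simp only [bitAt, List.length_append, List.length_singleton]
      have hidx : t.length + 1 - 1 - 0 = t.length := by omega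
      rw [hidx]
      have hget : (t ++ [c]).getD t.length 'X' = c := by
        simp [List.getD]
      rw [hget]; simp
    | succ j =>
      rw [hp]
      have hdiv : (2 * parse2 t + (if c = '1' then 1 else 0)) / 2 = parse2 t := by
        split <;> omega
      have hlhs : (2 * parse2 t + (if c = '1' then 1 else 0)).testBit (j+1)
          = (parse2 t).testBit j := by
        rw [Nat.testBit_add_one, hdiv]
      rw [hlhs, ih hbt j]
      simp only [bitAt, List.length_append, List.length_singleton]
      by_cases hj : j < t.length
      · have h1 : decide (j < t.length) = true := by simpa using hj
        have h2 : decide (j + 1 < t.length + 1) = true := by simp; omega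
        rw [h1, h2]
        have hidx : t.length + 1 - 1 - (j + 1) = t.length - 1 - j := by omega
        rw [hidx]
        have hlt : t.length - 1 - j < t.length := by omega
        have hget : (t ++ [c]).getD (t.length - 1 - j) 'X' = t.getD (t.length - 1 - j) 'X' := by
          simp [List.getD, List.getElem?_append_left hlt]
        rw [hget]
      · have h1 : decide (j < t.length) = false := by simpa using hj
        have h2 : decide (j + 1 < t.length + 1) = false := by simp; omega
        rw [h1, h2]; simp

lemma binary_set (arr : List Char) (i : Nat) (c : Char) (hc : c = '0' ∨ c = '1')
    (hb : ∀ x ∈ arr, x = '0' ∨ x = '1') : ∀ x ∈ arr.set i c, x = '0' ∨ x = '1' := by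
  intro x hx
  rcases List.mem_or_eq_of_mem_set hx with h | h
  · exact hb x h
  · subst h; exact hc

lemma bitAt_parse2_set (arr : List Char) (i : Nat) (c : Char) (h36 : arr.length = 36)
    (hi : i < 36) (j : Nat) :
    bitAt (arr.set i c) j = if j = 35 - i then (decide (j < 36) && (c == '1')) else bitAt arr j := by
  simp only [bitAt, List.length_set, h36]
  by_cases hj : j < 36
  · have hidx : 36 - 1 - j < arr.length := by omega
    have hgetE : (arr.set i c)[36 - 1 - j]? = if i = 36 - 1 - j then some c else arr[36 - 1 - j]? := by
      rw [List.getElem?_set]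
      by_cases hij : i = 36 - 1 - j
      · have hlt : 35 - j < arr.length := by omega
        simp [hij, hlt]
      · simp [hij]
    have hget : (arr.set i c).getD (36 - 1 - j) 'X'
        = if i = 36 - 1 - j then c else arr.getD (36 - 1 - j) 'X' := by
      rw [List.getD_eq_getElem?_getD, hgetE]
      by_cases hij : i = 36 - 1 - j
      · rw [if_pos hij, if_pos hij, Option.getD_some]
      · rw [if_neg hij, if_neg hij, List.getD_eq_getElem?_getD]
    rw [hget]
    by_cases he : j = 35 - i
    · have hij : i = 36 - 1 - j := by omega
      rw [if_pos hij, if_pos he]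
    · have hij : ¬ (i = 36 - 1 - j) := by omega
      rw [if_neg hij, if_neg he]
  · have hne : ¬ (j = 35 - i) := by omega
    rw [if_neg hne]
    simp [hj]

lemma parse2_set_one (arr : List Char) (i : Nat) (h36 : arr.length = 36)
    (hb : ∀ x ∈ arr, x = '0' ∨ x = '1') (hi : i < 36) :
    parse2 (arr.set i '1') = parse2 arr ||| 2 ^ (35 - i) := by
  apply Nat.eq_of_testBit_eq
  intro j
  rw [testBit_parse2 _ (binary_set arr i '1' (Or.inr rfl) hb) j, bitAt_parse2_set arr i '1' h36 hi j,
    Nat.testBit_or, testBit_parse2 arr hb j, Nat.testBit_two_pow]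
  by_cases he : j = 35 - i
  · subst he
    simp [show (35:Nat) - i < 36 from by omega]
  · simp [he, show ¬(35 - i = j) from fun h => he h.symm]

lemma parse2_set_zero_testBit (arr : List Char) (i : Nat) (h36 : arr.length = 36)
    (hb : ∀ x ∈ arr, x = '0' ∨ x = '1') (hi : i < 36) (j : Nat) :
    (parse2 (arr.set i '0')).testBit j = ((parse2 arr).testBit j && !(decide (j = 35 - i))) := by
  rw [testBit_parse2 _ (binary_set arr i '0' (Or.inl rfl) hb) j, bitAt_parse2_set arr i '0' h36 hi j,
    testBit_parse2 arr hb j]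
  by_cases he : j = 35 - i <;> simp [he]

lemma shift_one_eq (m : Nat) : (1:Int) <<< m = ((2 ^ m : Nat) : Int) := by
  simp [Int.shiftLeft_eq]

-- the A loop ignores pairs whose char is neither '0' nor '1'
lemma foldA_tail (ps : List (Int × Char)) : ∀ arr : List Char,
    (∀ p ∈ ps, p.2 ≠ '0' ∧ p.2 ≠ '1') →
    ps.foldl (fun a (p : Int × Char) =>
      if p.2 = '0' then a.set p.1.toNat '0'
      else if p.2 = '1' then a.set p.1.toNat '1'
      else a) arr = arr := by
  induction ps with
  | nil => intro arr _; rfl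
  | cons p t ih =>
    intro arr h
    have hp := h p (List.mem_cons_self)
    simp only [List.foldl_cons, if_neg hp.1, if_neg hp.2]
    exact ih arr (fun q hq => h q (List.mem_cons_of_mem _ hq))

-- main loop invariant: A's bit-array fold against B's (ones, keep) fold
set_option maxHeartbeats 1000000 in
lemma loop_main : ∀ (cs : List Char) (i : Nat) (arr : List Char) (o k nn : Nat),
    arr.length = 36 → (∀ c ∈ arr, c = '0' ∨ c = '1') → i + cs.length ≤ 36 →
    (∀ j, j < 36 - i → o.testBit j = false) →
    (∀ j, j < 36 - i → k.testBit j = true) →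
    parse2 arr = (nn &&& k) ||| o →
    ((parse2 ((PySem.List.enumerate cs (i:Int)).foldl
        (fun a (p : Int × Char) =>
          if p.2 = '0' then a.set p.1.toNat '0'
          else if p.2 = '1' then a.set p.1.toNat '1'
          else a) arr) : Nat) : Int)
      = PySem.Int.bor (PySem.Int.band (nn:Int)
          ((PySem.List.enumerate cs (i:Int)).foldl
            (fun (s : Int × Int) (p : Int × Char) =>
              if p.2 = '1' then (PySem.Int.bor s.1 ((1:Int) <<< (35 - p.1).toNat), s.2)
              else if p.2 = '0' then (s.1, PySem.Int.bxor s.2 ((1:Int) <<< (35 - p.1).toNat))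
              else s)
            ((o:Int), (k:Int))).2)
          ((PySem.List.enumerate cs (i:Int)).foldl
            (fun (s : Int × Int) (p : Int × Char) =>
              if p.2 = '1' then (PySem.Int.bor s.1 ((1:Int) <<< (35 - p.1).toNat), s.2)
              else if p.2 = '0' then (s.1, PySem.Int.bxor s.2 ((1:Int) <<< (35 - p.1).toNat))
              else s)
            ((o:Int), (k:Int))).1 := by
  intro cs
  induction cs with
  | nil =>
    intro i arr o k nn h36 hb hlen ho hk hinv
    rw [PySem.List.enumerate_nil]
    simp only [List.foldl_nil]
    rw [PySem.Int.band_natCast, PySem.Int.bor_natCast, hinv]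
  | cons c t ih =>
    intro i arr o k nn h36 hb hlen ho hk hinv
    have hi35 : i ≤ 35 := by
      have h := hlen; simp only [List.length_cons] at h; omega
    have hlen' : (i + 1) + t.length ≤ 36 := by
      have h := hlen; simp only [List.length_cons] at h; omega
    have h35 : ((35:Int) - (i:Int)).toNat = 35 - i := by omega
    rw [PySem.List.enumerate_cons, List.foldl_cons, List.foldl_cons,
        show (i:Int) + 1 = ((i + 1 : Nat) : Int) from by push_cast; ring]
    by_cases hc1 : c = '1'
    · rw [show (if ((i:Int), c).2 = '0' then arr.set ((i:Int), c).1.toNat '0'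
           else if ((i:Int), c).2 = '1' then arr.set ((i:Int), c).1.toNat '1'
           else arr) = arr.set i '1' from by subst hc1; simp]
      rw [show (if ((i:Int), c).2 = '1' then (PySem.Int.bor ((o:Int), (k:Int)).1 ((1:Int) <<< (35 - ((i:Int), c).1).toNat), ((o:Int), (k:Int)).2)
           else if ((i:Int), c).2 = '0' then (((o:Int), (k:Int)).1, PySem.Int.bxor ((o:Int), (k:Int)).2 ((1:Int) <<< (35 - ((i:Int), c).1).toNat))
           else ((o:Int), (k:Int)))
          = (((o ||| 2 ^ (35 - i) : Nat) : Int), (k:Int)) from by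
          subst hc1
          rw [if_pos (show ((i:Int), ('1':Char)).2 = '1' from rfl)]
          dsimp only
          rw [h35, shift_one_eq, PySem.Int.bor_natCast]]
      exact ih (i+1) (arr.set i '1') (o ||| 2 ^ (35 - i)) k nn
        (by rw [List.length_set, h36])
        (binary_set arr i '1' (Or.inr rfl) hb)
        hlen'
        (by
          intro j hj
          rw [Nat.testBit_or, Nat.testBit_two_pow]
          have h1 : o.testBit j = false := ho j (by omega)
          have h2 : ¬ (35 - i = j) := by omega
          simp [h1, h2])
        (fun j hj => hk j (by omega))
        (by rw [parse2_set_one arr i h36 hb (by omega), hinv, Nat.lor_assoc])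
    · by_cases hc0 : c = '0'
      · rw [show (if ((i:Int), c).2 = '0' then arr.set ((i:Int), c).1.toNat '0'
             else if ((i:Int), c).2 = '1' then arr.set ((i:Int), c).1.toNat '1'
             else arr) = arr.set i '0' from by subst hc0; simp]
        rw [show (if ((i:Int), c).2 = '1' then (PySem.Int.bor ((o:Int), (k:Int)).1 ((1:Int) <<< (35 - ((i:Int), c).1).toNat), ((o:Int), (k:Int)).2)
             else if ((i:Int), c).2 = '0' then (((o:Int), (k:Int)).1, PySem.Int.bxor ((o:Int), (k:Int)).2 ((1:Int) <<< (35 - ((i:Int), c).1).toNat))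
             else ((o:Int), (k:Int)))
            = ((o:Int), ((k ^^^ 2 ^ (35 - i) : Nat) : Int)) from by
            subst hc0
            rw [if_neg (show ¬ ((i:Int), ('0':Char)).2 = '1' by simp),
              if_pos (show ((i:Int), ('0':Char)).2 = '0' from rfl)]
            dsimp only
            rw [h35, shift_one_eq, PySem.Int.bxor_natCast]]
        exact ih (i+1) (arr.set i '0') o (k ^^^ 2 ^ (35 - i)) nn
          (by rw [List.length_set, h36])
          (binary_set arr i '0' (Or.inl rfl) hb)
          hlen'
          (fun j hj => ho j (by omega))
          (by
            intro j hj
            rw [Nat.testBit_xor, Nat.testBit_two_pow]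
            have h1 : k.testBit j = true := hk j (by omega)
            have h2 : ¬ (35 - i = j) := by omega
            simp [h1, h2])
          (by
            apply Nat.eq_of_testBit_eq
            intro j
            rw [parse2_set_zero_testBit arr i h36 hb (by omega) j, hinv]
            rw [Nat.testBit_or, Nat.testBit_or, Nat.testBit_and, Nat.testBit_and,
              Nat.testBit_xor, Nat.testBit_two_pow]
            by_cases he : j = 35 - i
            · subst he
              have hko : k.testBit (35 - i) = true := hk _ (by omega)
              have hoo : o.testBit (35 - i) = false := ho _ (by omega)
              simp [hko, hoo]
            · simp [he, show ¬(35 - i = j) from fun h => he h.symm])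
      · rw [show (if ((i:Int), c).2 = '0' then arr.set ((i:Int), c).1.toNat '0'
             else if ((i:Int), c).2 = '1' then arr.set ((i:Int), c).1.toNat '1'
             else arr) = arr from by simp [hc0, hc1]]
        rw [show (if ((i:Int), c).2 = '1' then (PySem.Int.bor ((o:Int), (k:Int)).1 ((1:Int) <<< (35 - ((i:Int), c).1).toNat), ((o:Int), (k:Int)).2)
             else if ((i:Int), c).2 = '0' then (((o:Int), (k:Int)).1, PySem.Int.bxor ((o:Int), (k:Int)).2 ((1:Int) <<< (35 - ((i:Int), c).1).toNat))
             else ((o:Int), (k:Int))) = ((o:Int), (k:Int)) from by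
            simp [hc0, hc1]]
        exact ih (i+1) arr o k nn h36 hb hlen'
          (fun j hj => ho j (by omega))
          (fun j hj => hk j (by omega))
          hinv

lemma to_bit_array_spec (num : Int) (h0 : 0 ≤ num) (h1 : num ≤ 2147483648) :
    (to_bit_array num).length = 36 ∧ (∀ c ∈ to_bit_array num, c = '0' ∨ c = '1') ∧
      parse2 (to_bit_array num) = num.toNat := by
  have hnneg : ¬ num < 0 := by omega
  set L : List Char := if num = 0 then ['0'] else natBinAux num.toNat [] with hLdef
  have hpy : pyBinChars num = '0' :: 'b' :: L := by
    unfold pyBinChars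
    rw [if_neg hnneg]
    by_cases hz : num = 0
    · rw [if_pos hz, hLdef, if_pos hz]
    · rw [if_neg hz, hLdef, if_neg hz]
  have hdrop : PySem.List.slice ('0' :: 'b' :: L) (some (2:Int)) none = L := by
    rw [PySem.List.slice_from _ (by norm_num)]
    rfl
  have hparse : parse2 L = num.toNat := by
    by_cases hz : num = 0
    · rw [hLdef, if_pos hz, hz]
      decide
    · rw [hLdef, if_neg hz]
      have h2 := natBinAux_parse2 num.toNat []
      simp only [List.length_nil, pow_zero, mul_one] at h2
      have h3 : parse2 [] = 0 := rfl
      rw [h3] at h2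
      omega
  have hbin : ∀ c ∈ L, c = '0' ∨ c = '1' := by
    by_cases hz : num = 0
    · rw [hLdef, if_pos hz]; intro c hc; simp at hc; subst hc; left; rfl
    · rw [hLdef, if_neg hz]; exact natBinAux_binary num.toNat [] (by simp)
  have hlen33 : L.length ≤ 33 := by
    by_cases hz : num = 0
    · rw [hLdef, if_pos hz]; simp
    · rw [hLdef, if_neg hz]
      have hlt : num.toNat < 2 ^ 33 := by
        have h' : num.toNat ≤ 2147483648 := by omega
        have h33 : (2:Nat) ^ 33 = 8589934592 := by norm_num
        omega
      have := natBinAux_length 33 num.toNat [] hlt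
      simpa using this
  have hlt36 : L.length < 36 := by omega
  have e1 : to_bit_array num = List.replicate (36 - L.length) '0' ++ L := by
    simp only [to_bit_array]
    rw [hpy, hdrop, if_pos hlt36]
  rw [e1]
  refine ⟨?_, ?_, ?_⟩
  · rw [List.length_append, List.length_replicate]; omega
  · intro c hc
    rcases List.mem_append.mp hc with h | h
    · exact Or.inl (List.eq_of_mem_replicate h)
    · exact hbin c h
  · rw [parse2_append, parse2_replicate_zero, hparse]
    simp

-- ===== VERDICT (by name: the statement is the Claim_ definition above) =====
theorem apply_simple_mask_spec : Claim_equal_apply_simple_mask := by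
  intro num mask hdom hpre
  unfold Spec_apply_simple_mask
  obtain ⟨hnn, htail⟩ := hpre
  have hdom' : num ≤ 2147483648 := by
    unfold Dom_apply_simple_mask pvDomInt at hdom
    simp [Bool.and_eq_true, decide_eq_true_eq] at hdom
    exact hdom.1.2
  obtain ⟨hL, hB, hP⟩ := to_bit_array_spec num hnn hdom'
  have hnum : num = ((num.toNat : Nat) : Int) := (Int.toNat_of_nonneg hnn).symm
  have hlt : num.toNat < 2 ^ 36 := by
    have h36 : (2:Nat) ^ 36 = 68719476736 := by norm_num
    omega
  -- split A's enumerate into the first 36 chars and the (no-op) tail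
  have eA : PySem.List.enumerate mask.toList (0:Int)
      = PySem.List.enumerate (mask.toList.take 36) (0:Int)
        ++ PySem.List.enumerate (mask.toList.drop 36) ((0:Int) + (mask.toList.take 36).length) := by
    conv_lhs => rw [← List.take_append_drop 36 mask.toList]
    rw [PySem.List.enumerate_append]
  have htail' : ∀ p ∈ PySem.List.enumerate (mask.toList.drop 36)
      ((0:Int) + (mask.toList.take 36).length), p.2 ≠ '0' ∧ p.2 ≠ '1' := by
    intro p hp
    rw [PySem.List.mem_enumerate_iff] at hp
    obtain ⟨j, hj, rfl⟩ := hp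
    have hmem : (mask.toList.drop 36)[j] ∈ mask.toList.drop 36 := List.getElem_mem hj
    have := List.all_eq_true.mp htail _ hmem
    simp at this
    exact ⟨by simpa using this.1, by simpa using this.2⟩
  have eB : PySem.List.slice mask.toList none (some (36:Int)) = mask.toList.take 36 := by
    rw [PySem.List.slice_to mask.toList (by norm_num)]
    rfl
  have hinit1 : (0:Int) = ((0 : Nat) : Int) := rfl
  have hinit2 : ((1:Int) <<< 36) - 1 = ((2 ^ 36 - 1 : Nat) : Int) := by decide
  simp only [apply_simple_mask, apply_simple_mask_alt, from_bit_array, eA, eB,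
    List.foldl_append]
  rw [foldA_tail _ _ htail']
  rw [hinit1, hinit2]
  conv_rhs => rw [hnum]
  exact loop_main (mask.toList.take 36) 0 (to_bit_array num) 0 (2 ^ 36 - 1) num.toNat
    hL hB
    (by simp [List.length_take])
    (fun j _ => Nat.zero_testBit j)
    (fun j hj => by rw [Nat.testBit_two_pow_sub_one]; simpa using hj)
    (by rw [hP, Nat.and_two_pow_sub_one_eq_mod, Nat.mod_eq_of_lt hlt, Nat.or_zero])
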